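-- pv_equiv track=rewrite | github.com/Shada12354/FFR105-Stochastic-optimization-algorithms | newton-raphson.py | differentiate_polynomial
-- ===== SOURCE A (Python) =====
-- def differentiate_polynomial(polynomial_coefficients, derivative_order):
--
--     if derivative_order >= len(polynomial_coefficients):
--         derivative_coefficients = []
--         return derivative_coefficients
--
--     derivative_coefficients = polynomial_coefficients[:]
--
--    #Starting at index 1, x^0 never gives a derivative
--     for m in range(derivative_order):
--         derivative_coefficients = [n * derivative_coefficients[n] for n in range(1,len(derivative_coefficients))]
--
--     return derivative_coefficients
-- ===== SOURCE B (Python) =====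
-- def differentiate_polynomial(polynomial_coefficients, derivative_order):
--     n = len(polynomial_coefficients)
--     if derivative_order >= n:
--         return []
--     if derivative_order <= 0:
--         return polynomial_coefficients[:]
--     k = derivative_order
--     c = 1
--     for j in range(1, k + 1):
--         c *= j            # c = k!
--     out = []
--     for i in range(n - k):
--         out.append(polynomial_coefficients[i + k] * c)
--         c = c * (i + k + 1) // (i + 1)   # falling factorial (i+1+k)!/(i+1)!, exact division
--     return out
-- ===== Notes on version B (the rewrite author's own statement) =====
-- stated objective: faster
-- what changed: A rebuilds the whole coefficient list k times (k nested comprehension passes); B makes a single pass, multiplying each coefficient by an incrementally maintained falling-factorial factor (start at k!, update by one multiply and one exact floor-divide per element).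
import Mathlib
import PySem

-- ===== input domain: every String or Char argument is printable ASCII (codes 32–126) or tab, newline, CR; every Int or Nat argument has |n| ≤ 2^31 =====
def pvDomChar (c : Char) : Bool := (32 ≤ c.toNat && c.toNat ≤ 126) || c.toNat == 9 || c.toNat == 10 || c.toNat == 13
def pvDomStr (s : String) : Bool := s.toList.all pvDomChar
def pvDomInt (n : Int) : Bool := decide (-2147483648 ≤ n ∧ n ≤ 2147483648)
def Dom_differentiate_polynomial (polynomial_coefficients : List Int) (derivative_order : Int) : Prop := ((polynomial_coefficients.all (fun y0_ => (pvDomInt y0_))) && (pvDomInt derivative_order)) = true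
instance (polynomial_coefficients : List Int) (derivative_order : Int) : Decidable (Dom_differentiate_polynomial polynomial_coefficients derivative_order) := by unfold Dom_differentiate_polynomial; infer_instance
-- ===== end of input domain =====

-- B replaces A's k repeated full-list rebuild passes by one pass that maintains the
-- falling-factorial coefficient incrementally (multiply, exact floor-divide); same return value.

-- ===== PORT A =====
-- the inner pass: [n * dc[n] for n in range(1, len(dc))]
def dpStep (dc : List Int) : List Int :=
  (PySem.List.pyRange 1 dc.length 1).map (fun n => n * PySem.List.pyGetD dc n 0)

def differentiate_polynomial (polynomial_coefficients : List Int) (derivative_order : Int) : List Int :=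
  if derivative_order ≥ (polynomial_coefficients.length : Int) then []
  else
    (PySem.List.pyRange 0 derivative_order 1).foldl (fun dc _ => dpStep dc) polynomial_coefficients

-- ===== PORT B =====
def differentiate_polynomial_alt (polynomial_coefficients : List Int) (derivative_order : Int) : List Int :=
  if derivative_order ≥ (polynomial_coefficients.length : Int) then []
  else if derivative_order ≤ 0 then polynomial_coefficients
  else
    -- initial c is k! ; loop state (out, c): out.append(pc[i+k] * c); c = c * (i+k+1) // (i+1)
    ((PySem.List.pyRange 0 ((polynomial_coefficients.length : Int) - derivative_order) 1).foldl
      (fun (st : List Int × Int) i =>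
        (st.1 ++ [PySem.List.pyGetD polynomial_coefficients (i + derivative_order) 0 * st.2],
         PySem.Int.floordiv (st.2 * (i + derivative_order + 1)) (i + 1)))
      ([], (PySem.List.pyRange 1 (derivative_order + 1) 1).foldl (fun c j => c * j) 1)).1

-- ===== PRECONDITION & SPEC =====
def Spec_differentiate_polynomial (polynomial_coefficients : List Int) (derivative_order : Int) (out : List Int) : Prop := out = differentiate_polynomial_alt polynomial_coefficients derivative_order
instance (polynomial_coefficients : List Int) (derivative_order : Int) (out : List Int) : Decidable (Spec_differentiate_polynomial polynomial_coefficients derivative_order out) := by unfold Spec_differentiate_polynomial; infer_instance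

-- ===== CLAIM (what is proved, stated in full; the proofs are below) =====
def Claim_equal_differentiate_polynomial : Prop := ∀ (polynomial_coefficients : List Int) (derivative_order : Int), Dom_differentiate_polynomial polynomial_coefficients derivative_order → Spec_differentiate_polynomial polynomial_coefficients derivative_order (differentiate_polynomial polynomial_coefficients derivative_order)

-- ===== LEMMAS AND PROOFS =====

-- falling factorial: ff i m = (i+1)(i+2)⋯(i+m)
def ff : Nat → Nat → Nat
  | _, 0 => 1
  | i, m + 1 => (i + 1) * ff (i + 1) m

theorem ff_succ_right (i m : Nat) : ff i (m + 1) = ff i m * (i + m + 1) := by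
  induction m generalizing i with
  | zero => simp [ff]
  | succ m ih => rw [ff, ih (i+1), ff]; ring

theorem c0_eq_ff (kn : Nat) :
    (PySem.List.pyRange 1 ((kn : Int) + 1) 1).foldl (fun c j => c * j) 1 = ((ff 0 kn : Nat) : Int) := by
  induction kn with
  | zero => simp [ff]
  | succ m ih =>
      have h : ((m + 1 : Nat) : Int) + 1 = ((m : Int) + 1) + 1 := by push_cast; ring
      rw [h, PySem.List.pyRange_one_succ_right (by omega), List.foldl_append, ih]
      simp [ff_succ_right]

theorem closed_eq_alt_loop (pc : List Int) (kn t : Nat) :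
    (PySem.List.pyRange 0 (t : Int) 1).foldl
      (fun (st : List Int × Int) i =>
        (st.1 ++ [PySem.List.pyGetD pc (i + (kn : Int)) 0 * st.2],
         PySem.Int.floordiv (st.2 * (i + kn + 1)) (i + 1)))
      ([], ((ff 0 kn : Nat) : Int))
    = ((List.range t).map (fun i => pc.getD (i + kn) 0 * ((ff i kn : Nat) : Int)),
       ((ff t kn : Nat) : Int)) := by
  induction t with
  | zero => simp
  | succ m ih =>
      have h : ((m + 1 : Nat) : Int) = (m : Int) + 1 := by push_cast; ring
      rw [h, PySem.List.pyRange_one_succ_right (by omega), List.foldl_append, ih,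
        List.foldl_cons, List.foldl_nil, List.range_succ]
      have hget : PySem.List.pyGetD pc ((m : Int) + (kn : Int)) 0 = pc.getD (m + kn) 0 := by
        have : ((m : Int) + (kn : Int)) = ((m + kn : Nat) : Int) := by push_cast; ring
        rw [this, PySem.List.pyGetD_natCast]
      have hshift : ff m kn * (m + kn + 1) = (m + 1) * ff (m + 1) kn := by
        have := ff_succ_right m kn
        rw [show ff m (kn+1) = (m+1) * ff (m+1) kn from rfl] at this
        omega
      have hfd : PySem.Int.floordiv (((ff m kn : Nat) : Int) * ((m : Int) + (kn : Int) + 1)) ((m : Int) + 1)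
          = ((ff (m + 1) kn : Nat) : Int) := by
        have h1 : ((ff m kn : Nat) : Int) * ((m : Int) + (kn : Int) + 1) = ((ff m kn * (m + kn + 1) : Nat) : Int) := by push_cast; ring
        have h2 : ((m : Int) + 1) = ((m + 1 : Nat) : Int) := by push_cast; ring
        rw [h1, h2, PySem.Int.floordiv_natCast, hshift, Nat.mul_div_cancel_left _ (by omega)]
      apply Prod.ext
      · simp [hget]
      · simpa using hfd

theorem map_getD_range (xs : List Int) :
    (List.range xs.length).map (fun i => xs[i]?.getD 0) = xs := by
  apply List.ext_getElem
  · simp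
  · intro i h1 h2
    simp [List.getElem?_eq_getElem h2]

theorem dpStep_closed (xs : List Int) (m : Nat) :
    dpStep^[m] xs
      = (List.range (xs.length - m)).map
          (fun i => ((ff i m : Nat) : Int) * xs.getD (i + m) 0) := by
  induction m with
  | zero =>
      simp [ff]
      exact (map_getD_range xs).symm
  | succ m ih =>
      rw [Function.iterate_succ_apply', ih]
      unfold dpStep
      apply List.ext_getElem
      · simp [PySem.List.length_pyRange_one]
        omega
      · intro i h1 h2
        simp only [List.getElem_map, PySem.List.getElem_pyRange_one]
        have hidx : (1 : Int) + (i : Int) = ((i + 1 : Nat) : Int) := by push_cast; ring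
        have h2' : i < xs.length - (m+1) := by simpa using h2
        simp only [List.getElem_range]
        rw [hidx, PySem.List.pyGetD_natCast]
        rw [List.getD_eq_getElem?_getD, List.getElem?_map,
          List.getElem?_range (by omega : i + 1 < xs.length - m)]
        simp only [Option.map_some, Option.getD_some]
        have hi : i + 1 + m = i + (m + 1) := by omega
        rw [hi, show ff i (m+1) = (i+1) * ff (i+1) m from rfl]
        push_cast; ring

theorem foldl_const_iterate {α β : Type} (f : α → α) (l : List β) (init : α) :
    l.foldl (fun s _ => f s) init = f^[l.length] init := by
  induction l generalizing init with
  | nil => rfl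
  | cons x xs ih => simp [List.foldl, ih, Function.iterate_succ_apply]

-- ===== VERDICT (by name: the statement is the Claim_ definition above) =====
theorem differentiate_polynomial_spec : Claim_equal_differentiate_polynomial := by
  intro pc k _
  unfold Spec_differentiate_polynomial differentiate_polynomial differentiate_polynomial_alt
  by_cases hge : k ≥ (pc.length : Int)
  · simp [hge]
  · rw [if_neg hge, if_neg hge]
    by_cases hk : k ≤ 0
    · rw [if_pos hk, PySem.List.pyRange_one_eq_nil hk, List.foldl_nil]
    · rw [if_neg hk]
      lift k to Nat using (by omega)
      rw [foldl_const_iterate, PySem.List.length_pyRange_one,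
        show ((k : Int) - 0).toNat = k from by omega, dpStep_closed, c0_eq_ff,
        show ((pc.length : Int) - (k : Int)) = ((pc.length - k : Nat) : Int) from by omega,
        closed_eq_alt_loop pc k (pc.length - k)]
      exact List.map_congr_left (fun i _ => mul_comm _ _)
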